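-- pv_equiv track=rewrite | github.com/colorlace/correspondo | read_emails.py | drop_email_metadata
-- ===== SOURCE A (Python) =====
-- def drop_email_metadata(email: str) -> str:
-- 	"""Takes an email string and returns just the body, removing all metadata headers."""
-- 	lines = email.split('\n')
--
-- 	# Find the first blank line that separates headers from body
-- 	body_start = 0
-- 	for i, line in enumerate(lines):
-- 		if line.strip() == '':
-- 			body_start = i + 1
-- 			break
--
-- 	# Return the body, stripping leading/trailing whitespace
-- 	return '\n'.join(lines[body_start:]).strip()
-- ===== SOURCE B (Python) =====
-- def drop_email_metadata(email: str) -> str: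
-- 	"""Takes an email string and returns just the body, removing all metadata headers."""
-- 	# One pass over the characters: track whether the current line is still all
-- 	# whitespace; the first newline that closes such a line starts the body.
-- 	blank = True
-- 	for i, c in enumerate(email):
-- 		if c == '\n':
-- 			if blank:
-- 				return email[i + 1:].strip()
-- 			blank = True
-- 		elif blank and not c.isspace():
-- 			blank = False
-- 	# No newline-terminated blank line: a blank final line means empty body,
-- 	# otherwise there was no separator and the whole email is the body.
-- 	return '' if blank else email.strip()
-- ===== Notes on version B (the rewrite author's own statement) =====
-- stated objective: alternative
-- what changed: Replaces A's split-into-lines / enumerate-scan / join-and-strip pipeline with a single character-level pass that tracks whether the current line is still all-whitespace and returns the stripped suffix right after the first blank line's newline.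
import Mathlib
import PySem

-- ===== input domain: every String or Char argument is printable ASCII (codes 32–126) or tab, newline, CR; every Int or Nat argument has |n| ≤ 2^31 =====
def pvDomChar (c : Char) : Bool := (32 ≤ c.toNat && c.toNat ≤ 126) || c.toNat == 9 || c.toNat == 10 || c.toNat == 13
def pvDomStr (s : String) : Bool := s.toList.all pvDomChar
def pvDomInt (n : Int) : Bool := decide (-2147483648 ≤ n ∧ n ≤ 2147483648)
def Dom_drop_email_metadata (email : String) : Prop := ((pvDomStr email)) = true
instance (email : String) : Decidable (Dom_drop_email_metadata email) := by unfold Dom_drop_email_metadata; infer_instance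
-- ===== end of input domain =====

-- B replaces A's split-into-lines / enumerate-scan / join-and-strip pipeline with a single
-- character-level pass (alternative decomposition; same asymptotic cost, not claimed faster).

-- ===== PORT A =====
-- A's 'for i, line in enumerate(lines): if line.strip() == "": body_start = i+1; break'
-- (body_start initialised to 0, left at 0 when no line is blank) as structural recursion
-- over the lines with the running index.
def dropFindA : List String → Int → Int
  | [], _ => 0
  | l :: ls, i => if PySem.Str.strip l = "" then i + 1 else dropFindA ls (i + 1)

def drop_email_metadata (email : String) : String :=
  -- email.split('\n'): the separator is non-empty, so this is exactly Chars.splitOn on the code points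
  let lines : List String := (PySem.Chars.splitOn email.toList ['\n']).map String.ofList
  let body_start : Int := dropFindA lines 0
  PySem.Str.strip (PySem.Str.join "\n" (PySem.List.slice lines (some body_start) none))

-- ===== PORT B =====
-- B's for-loop over enumerate(email): 'blank' tracks whether the current line is all
-- whitespace so far; the scanned suffix plays the role of email[i+1:] after a newline.
def bodyScan (whole : List Char) : Bool → List Char → List Char
  | blank, [] => if blank then [] else PySem.Chars.strip whole
  | blank, c :: rest =>
    if c = '\n' then
      if blank then PySem.Chars.strip rest else bodyScan whole true rest
    else if blank && !(PySem.Chars.isspace c) then bodyScan whole false rest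
    else bodyScan whole blank rest

def drop_email_metadata_alt (email : String) : String :=
  String.ofList (bodyScan email.toList true email.toList)

-- ===== PRECONDITION & SPEC =====
def Spec_drop_email_metadata (email : String) (out : String) : Prop := out = drop_email_metadata_alt email
instance (email : String) (out : String) : Decidable (Spec_drop_email_metadata email out) := by unfold Spec_drop_email_metadata; infer_instance

-- ===== CLAIM (what is proved, stated in full; the proofs are below) =====
def Claim_equal_drop_email_metadata : Prop := ∀ (email : String), Dom_drop_email_metadata email → Spec_drop_email_metadata email (drop_email_metadata email)

-- ===== LEMMAS AND PROOFS =====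

-- structural version of split-on-'\n' used only by the proof
def mergeHead (pre : List Char) : List (List Char) → List (List Char)
  | [] => [pre]
  | h :: t => (pre ++ h) :: t

def splitNL : List Char → List (List Char)
  | [] => [[]]
  | c :: cs => if c = '\n' then [] :: splitNL cs else mergeHead [c] (splitNL cs)

theorem splitNL_ne_nil (cs : List Char) : splitNL cs ≠ [] := by
  cases cs with
  | nil => simp [splitNL]
  | cons c cs =>
    simp only [splitNL]
    split
    · simp
    · cases h : splitNL cs <;> simp [mergeHead]

theorem splitOn_go_spec (fuel : Nat) (l cur : List Char) (acc : List (List Char))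
    (h : l.length ≤ fuel) :
    PySem.Chars.splitOn.go ['\n'] fuel l cur acc
      = acc.reverse ++ mergeHead cur.reverse (splitNL l) := by
  induction fuel generalizing l cur acc with
  | zero =>
    have : l = [] := List.length_eq_zero_iff.mp (Nat.le_zero.mp h)
    subst this
    simp [PySem.Chars.splitOn.go, splitNL, mergeHead]
  | succ fuel ih =>
    cases l with
    | nil => simp [PySem.Chars.splitOn.go, splitNL, mergeHead]
    | cons c rest =>
      by_cases hc : c = '\n'
      · subst hc
        have hp : List.isPrefixOf ['\n'] ('\n' :: rest) = true := by
          simp [List.isPrefixOf]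
        simp only [PySem.Chars.splitOn.go, hp, if_pos, List.length_cons,
          List.length_nil, Nat.zero_add, List.drop_succ_cons, List.drop_zero]
        rw [ih rest [] (cur.reverse :: acc) (by simpa using Nat.le_of_succ_le_succ h)]
        cases hs : splitNL rest with
        | nil => exact absurd hs (splitNL_ne_nil rest)
        | cons x t => simp [splitNL, mergeHead, hs]
      · have hp : List.isPrefixOf ['\n'] (c :: rest) = false := by
          simp [List.isPrefixOf]
          intro hcc; exact hc hcc.symm
        simp only [PySem.Chars.splitOn.go, hp]
        rw [ih rest (c :: cur) acc (by simpa using Nat.le_of_succ_le_succ h)]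
        cases hs : splitNL rest with
        | nil => exact absurd hs (splitNL_ne_nil rest)
        | cons x t => simp [splitNL, mergeHead, hs, hc]

theorem splitOn_eq_splitNL (cs : List Char) :
    PySem.Chars.splitOn cs ['\n'] = splitNL cs := by
  have h := splitOn_go_spec (cs.length + 1) cs [] [] (by omega)
  rw [PySem.Chars.splitOn, h]
  cases hs : splitNL cs with
  | nil => exact absurd hs (splitNL_ne_nil cs)
  | cons x t => simp [mergeHead]

theorem join_splitNL (cs : List Char) :
    PySem.Chars.join ['\n'] (splitNL cs) = cs := by
  induction cs with
  | nil => simp [splitNL, PySem.Chars.join_singleton]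
  | cons c cs ih =>
    simp only [splitNL]
    cases hs : splitNL cs with
    | nil => exact absurd hs (splitNL_ne_nil cs)
    | cons x t =>
      rw [hs] at ih
      by_cases hc : c = '\n'
      · subst hc
        rw [if_pos rfl, PySem.Chars.join_cons_cons, ih]
        simp
      · rw [if_neg hc]
        cases t with
        | nil =>
          rw [PySem.Chars.join_singleton] at ih
          simp [mergeHead, PySem.Chars.join_singleton, ih]
        | cons y t' =>
          rw [PySem.Chars.join_cons_cons] at ih
          simp [mergeHead, PySem.Chars.join_cons_cons, ← ih]

-- strip l = [] exactly on all-whitespace lines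
theorem strip_eq_nil_iff (l : List Char) :
    PySem.Chars.strip l = [] ↔ l.all PySem.Chars.isspace = true := by
  constructor
  · intro h
    rw [PySem.Chars.strip, PySem.Chars.rstrip] at h
    have h2 : List.dropWhile PySem.Chars.isspace (PySem.Chars.lstrip l).reverse = [] := by
      simpa using h
    have h3 : ∀ x ∈ (PySem.Chars.lstrip l).reverse, PySem.Chars.isspace x = true :=
      List.dropWhile_eq_nil_iff.mp h2
    rw [List.all_eq_true]
    intro x hx
    have hx' : x ∈ List.takeWhile PySem.Chars.isspace l ++ List.dropWhile PySem.Chars.isspace l := by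
      rw [List.takeWhile_append_dropWhile]; exact hx
    rcases List.mem_append.mp hx' with hx1 | hx2
    · exact List.mem_takeWhile_imp hx1
    · exact h3 x (List.mem_reverse.mpr hx2)
  · intro h
    have h1 : PySem.Chars.lstrip l = [] := by
      rw [PySem.Chars.lstrip, List.dropWhile_eq_nil_iff]
      intro x hx; exact (List.all_eq_true.mp h) x hx
    rw [PySem.Chars.strip, h1, PySem.Chars.rstrip]
    simp

-- splitNL on a newline-free string / splitting off the first line
theorem splitNL_no_nl (cs : List Char) (h : '\n' ∉ cs) : splitNL cs = [cs] := by
  induction cs with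
  | nil => simp [splitNL]
  | cons c cs ih =>
    have hc : c ≠ '\n' := fun hc => h (hc ▸ List.mem_cons_self)
    rw [splitNL, if_neg hc, ih (fun hm => h (List.mem_cons_of_mem _ hm))]
    simp [mergeHead]

theorem splitNL_append (l rest : List Char) (h : '\n' ∉ l) :
    splitNL (l ++ '\n' :: rest) = l :: splitNL rest := by
  induction l with
  | nil => simp [splitNL]
  | cons c l' ih =>
    have hc : c ≠ '\n' := fun hc => h (hc ▸ List.mem_cons_self)
    rw [List.cons_append, splitNL, if_neg hc, ih (fun hm => h (List.mem_cons_of_mem _ hm))]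
    simp [mergeHead]

-- B's scan through a newline-free chunk just updates the blank flag
theorem bodyScan_step (whole : List Char) (b : Bool) (c : Char) (cs : List Char)
    (hc : c ≠ '\n') :
    bodyScan whole b (c :: cs) = bodyScan whole (b && PySem.Chars.isspace c) cs := by
  cases b <;> cases hsp : PySem.Chars.isspace c <;> simp [bodyScan, hc, hsp]

theorem bodyScan_chunk (whole : List Char) (b : Bool) (l t : List Char) (h : '\n' ∉ l) :
    bodyScan whole b (l ++ t) = bodyScan whole (b && l.all PySem.Chars.isspace) t := by
  induction l generalizing b with
  | nil => simp
  | cons c l' ih =>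
    have hc : c ≠ '\n' := fun hc => h (hc ▸ List.mem_cons_self)
    rw [List.cons_append, bodyScan_step whole b c (l' ++ t) hc,
      ih _ (fun hm => h (List.mem_cons_of_mem _ hm))]
    simp [Bool.and_assoc]

-- A's search-and-join, phrased on the line list (the proof-side pivot)
def aBody (whole : List Char) : List (List Char) → List Char
  | [] => PySem.Chars.strip whole
  | l :: ls =>
    if l.all PySem.Chars.isspace then PySem.Chars.strip (PySem.Chars.join ['\n'] ls)
    else aBody whole ls

-- split a string containing a newline at its first newline
theorem exists_first_nl (cs : List Char) (hn : '\n' ∈ cs) :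
    ∃ l rest, '\n' ∉ l ∧ cs = l ++ '\n' :: rest := by
  induction cs with
  | nil => simp at hn
  | cons c cs' ih =>
    by_cases hc : c = '\n'
    · exact ⟨[], cs', by simp, by rw [hc]; rfl⟩
    · have h' : '\n' ∈ cs' := by
        rcases List.mem_cons.mp hn with h | h
        · exact absurd h.symm hc
        · exact h
      rcases ih h' with ⟨l, rest, hl, hrw⟩
      refine ⟨c :: l, rest, ?_, by rw [List.cons_append, hrw]⟩
      intro hm
      rcases List.mem_cons.mp hm with h | h
      · exact hc h.symm
      · exact hl h

-- B equals the pivot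
theorem bodyScan_eq_aBody (cs whole : List Char) :
    bodyScan whole true cs = aBody whole (splitNL cs) := by
  by_cases hn : '\n' ∈ cs
  · obtain ⟨l, rest, hl, hsplit⟩ := exists_first_nl cs hn
    subst hsplit
    rw [splitNL_append _ _ hl, bodyScan_chunk whole true _ _ hl]
    by_cases hb : (l.all PySem.Chars.isspace) = true
    · simp [hb, bodyScan, aBody, join_splitNL]
    · rw [Bool.and_eq_false_iff.mpr (Or.inr (by simpa using hb))]
      have hrec : bodyScan whole false ('\n' :: rest) = bodyScan whole true rest := by
        simp [bodyScan]
      rw [hrec, bodyScan_eq_aBody rest whole]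
      simp [aBody, hb]
  · rw [splitNL_no_nl cs hn]
    have := bodyScan_chunk whole true cs [] hn
    rw [List.append_nil] at this
    rw [this]
    by_cases hb : (cs.all PySem.Chars.isspace) = true
    · simp [hb, bodyScan, aBody, PySem.Chars.join_nil, PySem.Chars.strip,
        PySem.Chars.lstrip, PySem.Chars.rstrip]
    · simp [hb, bodyScan, aBody]
termination_by cs.length
decreasing_by
  simp_all [List.length_append]
  omega

-- A's index search: characterisations with and without a blank line
theorem dropFindA_none (ls : List String) (h : ∀ l ∈ ls, PySem.Str.strip l ≠ "") (i : Int) :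
    dropFindA ls i = 0 := by
  induction ls generalizing i with
  | nil => rfl
  | cons l t ih =>
    rw [dropFindA, if_neg (h l List.mem_cons_self)]
    exact ih (fun x hx => h x (List.mem_cons_of_mem _ hx)) (i + 1)

theorem dropFindA_found (ls : List String) (i : Int)
    (hb : ∃ l ∈ ls, PySem.Str.strip l = "") :
    dropFindA ls i = i + (ls.findIdx (fun l => PySem.Str.strip l == "") : Nat) + 1 := by
  induction ls generalizing i with
  | nil => simp at hb
  | cons l t ih =>
    by_cases hl : PySem.Str.strip l = ""
    · rw [dropFindA, if_pos hl, List.findIdx_cons]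
      simp [hl]
    · rw [dropFindA, if_neg hl, List.findIdx_cons]
      have hb' : ∃ x ∈ t, PySem.Str.strip x = "" := by
        rcases hb with ⟨x, hx, hxs⟩
        rcases List.mem_cons.mp hx with rfl | hx'
        · exact absurd hxs hl
        · exact ⟨x, hx', hxs⟩
      rw [ih (i + 1) hb']
      have : (PySem.Str.strip l == "") = false := by simpa using hl
      rw [this]
      simp only [cond_false]
      push_cast
      omega

-- the pivot, reached from A's side when some line is blank
theorem aBody_found (whole : List Char) (ls : List (List Char))
    (hb : ∃ l ∈ ls, l.all PySem.Chars.isspace = true) :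
    aBody whole ls
      = PySem.Chars.strip (PySem.Chars.join ['\n']
          (ls.drop (ls.findIdx (fun l => l.all PySem.Chars.isspace) + 1))) := by
  induction ls with
  | nil => simp at hb
  | cons l t ih =>
    by_cases hl : l.all PySem.Chars.isspace = true
    · rw [aBody, if_pos hl, List.findIdx_cons]
      simp [hl]
    · rw [aBody, if_neg hl, List.findIdx_cons]
      have hb' : ∃ x ∈ t, x.all PySem.Chars.isspace = true := by
        rcases hb with ⟨x, hx, hxs⟩
        rcases List.mem_cons.mp hx with rfl | hx'
        · exact absurd hxs hl
        · exact ⟨x, hx', hxs⟩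
      rw [ih hb']
      have : (l.all PySem.Chars.isspace) = false := by simpa using hl
      rw [this]
      simp

theorem aBody_none (whole : List Char) (ls : List (List Char))
    (h : ∀ l ∈ ls, ¬ l.all PySem.Chars.isspace = true) :
    aBody whole ls = PySem.Chars.strip whole := by
  induction ls with
  | nil => rfl
  | cons l t ih =>
    rw [aBody, if_neg (h l List.mem_cons_self)]
    exact ih (fun x hx => h x (List.mem_cons_of_mem _ hx))

theorem strip_ofList_eq_empty_iff (l : List Char) :
    PySem.Str.strip (String.ofList l) = "" ↔ l.all PySem.Chars.isspace = true := by
  rw [← strip_eq_nil_iff]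
  constructor
  · intro h
    have := congrArg String.toList h
    simpa [PySem.Str.toList_strip] using this
  · intro h
    apply String.ext
    simpa [PySem.Str.toList_strip] using h

theorem dropFindA_nonneg (ls : List String) (i : Int) (hi : 0 ≤ i) :
    0 ≤ dropFindA ls i := by
  induction ls generalizing i with
  | nil => exact le_refl 0
  | cons l t ih =>
    rw [dropFindA]
    split
    · omega
    · exact ih (i + 1) (by omega)

-- ===== VERDICT (by name: the statement is the Claim_ definition above) =====
theorem drop_email_metadata_spec : Claim_equal_drop_email_metadata := by
  intro email _
  unfold Spec_drop_email_metadata drop_email_metadata drop_email_metadata_alt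
  apply String.ext
  show (PySem.Str.strip (PySem.Str.join "\n" (PySem.List.slice
      ((PySem.Chars.splitOn email.toList ['\n']).map String.ofList)
      (some (dropFindA ((PySem.Chars.splitOn email.toList ['\n']).map String.ofList) 0)) none))).toList
    = (String.ofList (bodyScan email.toList true email.toList)).toList
  rw [splitOn_eq_splitNL]
  set cs := email.toList with hcs
  set ls := splitNL cs with hls
  have hnn : (0 : Int) ≤ dropFindA (ls.map String.ofList) 0 := dropFindA_nonneg _ 0 le_rfl
  rw [PySem.List.slice_from _ hnn]
  rw [PySem.Str.toList_strip, PySem.Str.toList_join]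
  have hmap : ∀ (n : Nat), ((ls.map String.ofList).drop n).map String.toList = ls.drop n := by
    intro n
    rw [← List.map_drop, List.map_map]
    have : (String.toList ∘ String.ofList) = (id : List Char → List Char) := by
      funext x; simp
    rw [this, List.map_id]
  rw [bodyScan_eq_aBody cs cs, ← hls]
  by_cases hb : ∃ l ∈ ls, l.all PySem.Chars.isspace = true
  · have hb' : ∃ l ∈ ls.map String.ofList, PySem.Str.strip l = "" := by
      rcases hb with ⟨l, hl, hall⟩
      exact ⟨String.ofList l, List.mem_map_of_mem hl, (strip_ofList_eq_empty_iff l).mpr hall⟩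
    rw [dropFindA_found _ 0 hb']
    have hidx : (ls.map String.ofList).findIdx (fun l => PySem.Str.strip l == "")
        = ls.findIdx (fun l => l.all PySem.Chars.isspace) := by
      rw [List.findIdx_map]
      congr 1
      funext l
      show (PySem.Str.strip (String.ofList l) == "") = l.all PySem.Chars.isspace
      by_cases h : l.all PySem.Chars.isspace = true
      · rw [h, beq_iff_eq.mpr ((strip_ofList_eq_empty_iff l).mpr h)]
      · rw [Bool.eq_false_iff.mpr h, beq_eq_false_iff_ne.mpr
          (fun hs => h ((strip_ofList_eq_empty_iff l).mp hs))]
    rw [hidx]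
    have hk : (0 + ((ls.findIdx (fun l => l.all PySem.Chars.isspace) : Nat) : Int) + 1).toNat
        = ls.findIdx (fun l => l.all PySem.Chars.isspace) + 1 := by omega
    rw [hk, hmap, aBody_found cs ls hb]
    have hnl : "\n".toList = ['\n'] := rfl
    rw [hnl]
    simp
  · have hb' : ∀ l ∈ ls.map String.ofList, PySem.Str.strip l ≠ "" := by
      intro l hl
      rcases List.mem_map.mp hl with ⟨x, hx, rfl⟩
      intro hstrip
      exact hb ⟨x, hx, (strip_ofList_eq_empty_iff x).mp hstrip⟩
    rw [dropFindA_none _ hb' 0]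
    have hm0 := hmap 0
    simp only [Int.toNat_zero, List.drop_zero] at hm0 ⊢
    rw [hm0, aBody_none cs ls (by intro l hl h; exact hb ⟨l, hl, h⟩)]
    have hnl : "\n".toList = ['\n'] := rfl
    rw [hnl, hls, join_splitNL]
    simp
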